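-- pv_equiv track=rewrite | github.com/luchenghong/python-learn | chat/chat.py | convert
-- ===== SOURCE A (Python) =====
-- def convert(chats):
--     new = []
--     person = None
--     for c in chats:
--         if c == 'Allen':
--             person = 'Allen'
--             continue
--         elif c =='Tom':
--             person = 'Tom'
--             continue
--         if person:
--             new.append(person + ':' + c)
--     return new
-- ===== SOURCE B (Python) =====
-- def convert(chats):
--     # Two-pass: segment into (speaker, messages) groups, then emit labels.
--     groups = []
--     for c in chats:
--         if c in ('Allen', 'Tom'):
--             groups.append((c, []))
--         elif groups:
--             groups[-1][1].append(c)
--     return [f'{spk}:{m}' for spk, msgs in groups for m in msgs]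
-- ===== Notes on version B (the rewrite author's own statement) =====
-- stated objective: alternative
-- what changed: Replaced the fused stateful loop (current-speaker variable plus direct label emission) by two passes: first segment the chat into (speaker, messages) groups, then flatten the groups with a nested comprehension that builds every label.
import Mathlib
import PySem

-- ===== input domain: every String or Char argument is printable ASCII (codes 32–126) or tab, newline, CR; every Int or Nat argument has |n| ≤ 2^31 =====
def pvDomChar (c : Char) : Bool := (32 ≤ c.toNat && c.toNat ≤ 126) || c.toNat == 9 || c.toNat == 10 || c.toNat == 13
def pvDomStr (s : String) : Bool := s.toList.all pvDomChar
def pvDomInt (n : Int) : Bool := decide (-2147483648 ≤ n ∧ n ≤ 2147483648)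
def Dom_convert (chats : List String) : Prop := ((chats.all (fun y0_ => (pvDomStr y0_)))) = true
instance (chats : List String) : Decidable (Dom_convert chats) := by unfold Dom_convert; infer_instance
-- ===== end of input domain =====

-- B is an alternative decomposition: segment into (speaker, messages) groups, then flatten; same cost as A.

-- ===== PORT A =====
-- one fused loop over (new, person)
def convertStepA (st : List String × Option String) (c : String) : List String × Option String :=
  if c = "Allen" then (st.1, some "Allen")
  else if c = "Tom" then (st.1, some "Tom")
  else
    match st.2 with
    | some p => (st.1 ++ [p ++ ":" ++ c], st.2)   -- `if person:` — person is None or a nonempty name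
    | none => (st.1, st.2)

def convert (chats : List String) : List String :=
  (chats.foldl convertStepA ([], none)).1

-- ===== PORT B =====
-- groups[-1][1].append(c)
def addMsgB : List (String × List String) → String → List (String × List String)
  | [], _ => []
  | [(s, ms)], c => [(s, ms ++ [c])]
  | g :: g' :: gs, c => g :: addMsgB (g' :: gs) c

def convertStepB (gs : List (String × List String)) (c : String) : List (String × List String) :=
  if c = "Allen" ∨ c = "Tom" then gs ++ [(c, [])]
  else if gs = [] then gs
  else addMsgB gs c

-- the nested comprehension
def flatB (gs : List (String × List String)) : List String :=
  gs.flatMap (fun g => g.2.map (fun m => g.1 ++ ":" ++ m))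

def convert_alt (chats : List String) : List String :=
  flatB (chats.foldl convertStepB [])

-- ===== PRECONDITION & SPEC =====
def Spec_convert (chats : List String) (out : List String) : Prop := out = convert_alt chats
instance (chats : List String) (out : List String) : Decidable (Spec_convert chats out) := by unfold Spec_convert; infer_instance

-- ===== CLAIM (what is proved, stated in full; the proofs are below) =====
def Claim_equal_convert : Prop := ∀ (chats : List String), Dom_convert chats → Spec_convert chats (convert chats)

-- ===== LEMMAS AND PROOFS =====
lemma addMsgB_concat (gs : List (String × List String)) (s : String) (ms : List String) (c : String) :
    addMsgB (gs ++ [(s, ms)]) c = gs ++ [(s, ms ++ [c])] := by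
  induction gs with
  | nil => rfl
  | cons g gs ih =>
    cases gs with
    | nil => simp [addMsgB]
    | cons g' gs' => simpa [addMsgB] using ih

lemma convert_invariant (chats : List String) :
    ∀ (gs : List (String × List String)) (acc : List String) (p : Option String),
      flatB gs = acc →
      ((gs = [] ∧ p = none) ∨ ∃ gs' s ms, gs = gs' ++ [(s, ms)] ∧ p = some s) →
      (chats.foldl convertStepA (acc, p)).1 = flatB (chats.foldl convertStepB gs) := by
  induction chats with
  | nil => intro gs acc p hflat _; simpa using hflat.symm
  | cons c rest ih =>
    intro gs acc p hflat hshape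
    simp only [List.foldl_cons]
    by_cases hA : c = "Allen"
    · subst hA
      have h1 : convertStepA (acc, p) "Allen" = (acc, some "Allen") := by
        simp [convertStepA]
      have h2 : convertStepB gs "Allen" = gs ++ [("Allen", [])] := by
        simp [convertStepB]
      rw [h1, h2]
      refine ih _ _ _ ?_ (Or.inr ⟨gs, "Allen", [], rfl, rfl⟩)
      simpa [flatB] using hflat
    · by_cases hT : c = "Tom"
      · subst hT
        have h1 : convertStepA (acc, p) "Tom" = (acc, some "Tom") := by
          simp [convertStepA, hA]
        have h2 : convertStepB gs "Tom" = gs ++ [("Tom", [])] := by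
          simp [convertStepB]
        rw [h1, h2]
        refine ih _ _ _ ?_ (Or.inr ⟨gs, "Tom", [], rfl, rfl⟩)
        simpa [flatB] using hflat
      · rcases hshape with ⟨hgs, hp⟩ | ⟨gs', s, ms, hgs, hp⟩
        · subst hgs; subst hp
          have h1 : convertStepA (acc, none) c = (acc, none) := by
            simp [convertStepA, hA, hT]
          have h2 : convertStepB [] c = ([] : List (String × List String)) := by
            simp [convertStepB, hA, hT]
          rw [h1, h2]
          exact ih _ _ _ hflat (Or.inl ⟨rfl, rfl⟩)
        · subst hgs; subst hp
          have h1 : convertStepA (acc, some s) c = (acc ++ [s ++ ":" ++ c], some s) := by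
            simp [convertStepA, hA, hT]
          have h2 : convertStepB (gs' ++ [(s, ms)]) c = gs' ++ [(s, ms ++ [c])] := by
            simp [convertStepB, hA, hT, addMsgB_concat]
          rw [h1, h2]
          refine ih _ _ _ ?_ (Or.inr ⟨gs', s, ms ++ [c], rfl, rfl⟩)
          subst hflat
          simp [flatB]

-- ===== VERDICT (by name: the statement is the Claim_ definition above) =====
theorem convert_spec : Claim_equal_convert := by
  intro chats _
  unfold Spec_convert convert convert_alt
  exact convert_invariant chats [] [] none rfl (Or.inl ⟨rfl, rfl⟩)
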